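-- pv_equiv track=rewrite | github.com/hyotaime/autofl_defects4j_data | workspace/extract_all.py | get_transitive_childs
-- ===== SOURCE A (Python) =====
-- def get_transitive_childs(child_classes: dict, class_name: str) -> set:
--     def _get_childs(cn):
--         if cn not in child_classes:
--             return set()
--         childs = child_classes[cn]
--         for c_cn in list(childs):
--             childs = childs.union(_get_childs(c_cn))
--         return childs
--
--     return _get_childs(class_name)
-- ===== SOURCE B (Python) =====
-- def get_transitive_childs(child_classes: dict, class_name: str) -> set:
--     # Iterative DFS with an explicit stack and a visited ('done') set:
--     # every class is expanded at most once (A's memoless recursion re-explores).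
--     result = []
--     seen = set()
--     done = set()
--     stack = [class_name]
--     while stack:
--         cn = stack.pop()
--         if cn in done:
--             continue
--         done.add(cn)
--         if cn not in child_classes:
--             continue
--         cs = list(child_classes[cn])
--         for c in cs:
--             if c not in seen:
--                 seen.add(c)
--                 result.append(c)
--         stack.extend(reversed(cs))
--     return set(result)
-- ===== Notes on version B (the rewrite author's own statement) =====
-- stated objective: alternative
-- what changed: A's memoless recursion (which re-explores a class once per path to it and never terminates on cycles) is replaced by an iterative depth-first traversal with an explicit stack and a visited set, expanding each class at most once.
import Mathlib
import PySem

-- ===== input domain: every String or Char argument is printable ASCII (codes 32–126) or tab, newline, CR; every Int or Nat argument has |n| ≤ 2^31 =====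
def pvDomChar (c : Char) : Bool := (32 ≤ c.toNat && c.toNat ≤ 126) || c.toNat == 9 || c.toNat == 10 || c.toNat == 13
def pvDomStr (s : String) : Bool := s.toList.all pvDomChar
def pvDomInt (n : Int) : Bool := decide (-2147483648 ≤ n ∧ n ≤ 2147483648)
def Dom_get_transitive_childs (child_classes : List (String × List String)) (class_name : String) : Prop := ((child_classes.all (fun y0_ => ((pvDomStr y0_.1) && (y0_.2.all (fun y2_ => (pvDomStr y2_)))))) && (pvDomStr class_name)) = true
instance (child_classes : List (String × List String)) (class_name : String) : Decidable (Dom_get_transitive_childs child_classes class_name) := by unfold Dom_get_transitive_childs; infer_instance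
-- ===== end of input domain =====

-- B replaces A's memoless recursion (which re-explores a class once per path to it and never
-- terminates on cycles) by an iterative DFS with an explicit stack and a visited set, expanding
-- each class at most once; A = B is proved on every input whose child map has no cycle
-- reachable from class_name (exactly where the Python A returns).


-- ===== PORT A =====
-- `child_classes[cn]` : the stored set, materialised as its distinct elements (values are Python sets)
def pvKids (g : List (String × List String)) (cn : String) : Option (List String) :=
  (PySem.Dict.mk g).get? cn

-- literal port of A's inner `_get_childs`; the fuel argument only makes the (possibly
-- non-terminating) recursion total — Pre_ guarantees it is never exhausted
def pvGoA (g : List (String × List String)) : Nat → String → List String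
  | 0, _ => []
  | f + 1, cn =>
    match pvKids g cn with
    | none => []                                   -- if cn not in child_classes: return set()
    | some v =>
      let childs := PySem.List.dedup v             -- childs = child_classes[cn] (a set)
      childs.foldl (fun acc c => PySem.Set.union acc (pvGoA g f c)) childs
      -- for c_cn in list(childs): childs = childs.union(_get_childs(c_cn))

def get_transitive_childs (child_classes : List (String × List String)) (class_name : String) : List String :=
  pvGoA child_classes (child_classes.length + 1) class_name

-- ===== PORT B =====
-- termination measure for the worklist loop: keys of g not yet marked done
def pvKeyset (g : List (String × List String)) : Finset String := (g.map Prod.fst).toFinset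

def pvTodo (g : List (String × List String)) (done : List String) : Nat :=
  ((pvKeyset g).filter (fun k => k ∉ done)).card

theorem pvKids_mem {g : List (String × List String)} {cn : String} {v : List String}
    (h : pvKids g cn = some v) : (cn, v) ∈ g := by
  induction g with
  | nil => exact absurd h (by rw [show pvKids ([] : List (String × List String)) cn = none from rfl]; simp)
  | cons p t ih =>
    obtain ⟨a, b⟩ := p
    rw [pvKids, PySem.Dict.get?_mk_cons] at h
    split at h
    · rename_i hab
      obtain rfl : a = cn := by simpa using hab
      obtain rfl : b = v := by simpa using h
      exact List.mem_cons_self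
    · exact List.mem_cons_of_mem _ (ih h)

theorem pvKids_mem_keys {g : List (String × List String)} {cn : String} {v : List String}
    (h : pvKids g cn = some v) : cn ∈ g.map Prod.fst :=
  List.mem_map.mpr ⟨(cn, v), pvKids_mem h, rfl⟩

theorem pvKids_not_key {g : List (String × List String)} {cn : String}
    (h : pvKids g cn = none) : cn ∉ g.map Prod.fst := by
  have := (PySem.Dict.get?_eq_none_iff_not_mem_keys (PySem.Dict.mk g) cn).mp h
  simpa [PySem.Dict.keys_mk] using this

theorem pvTodo_eq_of_not_key {g : List (String × List String)} {cn : String}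
    (h : pvKids g cn = none) (done : List String) :
    pvTodo g (PySem.Set.add done cn) = pvTodo g done := by
  have hcn := pvKids_not_key h
  unfold pvTodo
  apply congrArg Finset.card
  apply Finset.filter_congr
  intro k hk
  have hkm : k ∈ g.map Prod.fst := List.mem_toFinset.mp (by simpa [pvKeyset] using hk)
  have hne : k ≠ cn := by rintro rfl; exact hcn hkm
  simp [PySem.Set.mem_add, hne]

theorem pvTodo_lt_of_key {g : List (String × List String)} {cn : String} {v : List String}
    (h : pvKids g cn = some v) {done : List String} (hd : cn ∉ done) :
    pvTodo g (PySem.Set.add done cn) < pvTodo g done := by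
  apply Finset.card_lt_card
  rw [Finset.ssubset_def]
  have hsub : (pvKeyset g).filter (fun k => k ∉ PySem.Set.add done cn)
      ⊆ (pvKeyset g).filter (fun k => k ∉ done) := by
    intro k hk
    simp only [Finset.mem_filter, PySem.Set.mem_add] at *
    exact ⟨hk.1, fun hc => hk.2 (Or.inl hc)⟩
  have hmem : cn ∈ (pvKeyset g).filter (fun k => k ∉ done) := by
    simp only [Finset.mem_filter]
    exact ⟨List.mem_toFinset.mpr (pvKids_mem_keys h), hd⟩
  have hnot : cn ∉ (pvKeyset g).filter (fun k => k ∉ PySem.Set.add done cn) := by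
    simp [Finset.mem_filter, PySem.Set.mem_add]
  exact ⟨hsub, fun hs => hnot (hs hmem)⟩

-- literal port of B's while loop; the stack is kept top-first (Source B pops from the end and
-- pushes reversed(cs), which is the same traversal); `res` is both Source B's `result` and `seen`
-- (they hold the same elements; result's order is Source B's append order)
def pvGoB (g : List (String × List String)) (stack : List String)
    (res done : PySem.Set String) : List String :=
  match stack with
  | [] => res
  | cn :: rest =>
    if cn ∈ done then pvGoB g rest res done
    else
      match h : pvKids g cn with
      | none => pvGoB g rest res (PySem.Set.add done cn)
      | some v =>
        let cs := PySem.List.dedup v               -- cs = list(child_classes[cn])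
        pvGoB g (cs ++ rest) (PySem.Set.union res cs) (PySem.Set.add done cn)
termination_by (pvTodo g done, stack.length)
decreasing_by
  · exact Prod.Lex.right _ (Nat.lt_succ_self _)
  · rename_i hnd
    rw [pvTodo_eq_of_not_key h done]
    exact Prod.Lex.right _ (Nat.lt_succ_self _)
  · rename_i hnd
    exact Prod.Lex.left _ _ (pvTodo_lt_of_key h hnd)

def get_transitive_childs_alt (child_classes : List (String × List String)) (class_name : String) : List String :=
  PySem.Set.ofList (pvGoB child_classes [class_name] PySem.Set.empty PySem.Set.empty)   -- return set(result)

-- ===== PRECONDITION & SPEC =====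
-- bounded-iteration transitive closure of the child relation (a plain graph condition,
-- used only to state Pre_: "no cycle is reachable from class_name")
def pvStep (g : List (String × List String)) (s : PySem.Set String) : PySem.Set String :=
  PySem.Set.update s (s.flatMap (fun k => (pvKids g k).getD []))

def pvIterN (g : List (String × List String)) (s0 : List String) : Nat :=
  s0.length + (g.flatMap (fun p => p.2)).length + 1

def pvCl (g : List (String × List String)) (s0 : List String) : List String :=
  (pvStep g)^[pvIterN g s0] (PySem.Set.ofList s0)

-- Pre_ holds exactly when no class reachable from class_name lies on a cycle of the child map;
-- on the excluded inputs the Python A raises RecursionError (it recurses forever).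
def Pre_get_transitive_childs (child_classes : List (String × List String)) (class_name : String) : Prop :=
  ∀ k ∈ pvCl child_classes [class_name], k ∉ pvCl child_classes ((pvKids child_classes k).getD [])
instance (child_classes : List (String × List String)) (class_name : String) : Decidable (Pre_get_transitive_childs child_classes class_name) := by unfold Pre_get_transitive_childs; infer_instance

def pvWitness_get_transitive_childs : (List (String × List String)) × String := ([("a", ["b"]), ("b", [])], "a")

def Spec_get_transitive_childs (child_classes : List (String × List String)) (class_name : String) (out : List String) : Prop := out = get_transitive_childs_alt child_classes class_name
instance (child_classes : List (String × List String)) (class_name : String) (out : List String) : Decidable (Spec_get_transitive_childs child_classes class_name out) := by unfold Spec_get_transitive_childs; infer_instance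

-- ===== CLAIM (what is proved, stated in full; the proofs are below) =====
def Claim_equal_get_transitive_childs : Prop := ∀ (child_classes : List (String × List String)) (class_name : String), Dom_get_transitive_childs child_classes class_name → Pre_get_transitive_childs child_classes class_name → Spec_get_transitive_childs child_classes class_name (get_transitive_childs child_classes class_name)


-- ===== LEMMAS AND PROOFS =====

-- small-step equations for the worklist loop (pvGoB is defined by well-founded recursion)
theorem pvGoB_nil (g : List (String × List String)) (res done : PySem.Set String) :
    pvGoB g [] res done = res := by
  rw [pvGoB]

theorem pvGoB_skip {g : List (String × List String)} {cn : String} {done : PySem.Set String}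
    (h : cn ∈ done) (rest : List String) (res : PySem.Set String) :
    pvGoB g (cn :: rest) res done = pvGoB g rest res done := by
  rw [pvGoB]; simp [h]

theorem pvGoB_none {g : List (String × List String)} {cn : String} {done : PySem.Set String}
    (h : cn ∉ done) (h2 : pvKids g cn = none) (rest : List String) (res : PySem.Set String) :
    pvGoB g (cn :: rest) res done = pvGoB g rest res (PySem.Set.add done cn) := by
  rw [pvGoB]; simp [h]; split <;> simp_all

theorem pvGoB_some {g : List (String × List String)} {cn : String} {done : PySem.Set String}
    {v : List String} (h : cn ∉ done) (h2 : pvKids g cn = some v) (rest : List String)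
    (res : PySem.Set String) :
    pvGoB g (cn :: rest) res done =
      pvGoB g (PySem.List.dedup v ++ rest)
        (PySem.Set.union res (PySem.List.dedup v)) (PySem.Set.add done cn) := by
  rw [pvGoB]; simp [h]; split <;> simp_all

-- reachability in the child graph (proof-side characterisation of pvCl)
inductive pvReach (g : List (String × List String)) : String → String → Prop
  | refl (x : String) : pvReach g x x
  | cons {x y z : String} : y ∈ ((pvKids g x).getD []) → pvReach g y z → pvReach g x z

theorem pvReach_snoc {g : List (String × List String)} {x y z : String}
    (h : pvReach g x y) (hz : z ∈ (pvKids g y).getD []) : pvReach g x z := by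
  induction h with
  | refl => exact pvReach.cons hz (pvReach.refl _)
  | cons he _ ih => exact pvReach.cons he (ih hz)

theorem pvStep_prefix (g : List (String × List String)) (s : PySem.Set String) :
    s <+: pvStep g s := by
  rw [pvStep, PySem.Set.update_eq_append_filter]; exact ⟨_, rfl⟩

theorem pvIter_prefix (g : List (String × List String)) (S0 : PySem.Set String) :
    ∀ m n, m ≤ n → (pvStep g)^[m] S0 <+: (pvStep g)^[n] S0 := by
  intro m n h
  induction n with
  | zero => obtain rfl := Nat.le_zero.mp h; exact List.prefix_rfl
  | succ n ih =>
    rcases Nat.eq_or_lt_of_le h with rfl | hlt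
    · exact List.prefix_rfl
    · rw [Function.iterate_succ_apply']
      exact (ih (Nat.lt_succ_iff.mp hlt)).trans (pvStep_prefix g _)

theorem pvMem_step {g : List (String × List String)} {s : PySem.Set String} {x : String} :
    x ∈ pvStep g s ↔ x ∈ s ∨ ∃ k ∈ s, x ∈ (pvKids g k).getD [] := by
  rw [pvStep, PySem.Set.mem_update]
  simp [List.mem_flatMap]

def pvU (g : List (String × List String)) (s0 : List String) : List String :=
  s0 ++ g.flatMap (fun p => p.2)

theorem pvIter_nodup (g : List (String × List String)) (s0 : List String) :
    ∀ n, ((pvStep g)^[n] (PySem.Set.ofList s0)).Nodup := by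
  intro n
  induction n with
  | zero => exact PySem.Set.nodup_ofList s0
  | succ n ih =>
    rw [Function.iterate_succ_apply', pvStep]
    exact PySem.Set.nodup_update _ _ ih

theorem pvIter_subset_U (g : List (String × List String)) (s0 : List String) :
    ∀ n, ∀ x ∈ (pvStep g)^[n] (PySem.Set.ofList s0), x ∈ pvU g s0 := by
  intro n
  induction n with
  | zero =>
    intro x hx
    exact List.mem_append_left _ ((PySem.Set.mem_ofList s0 x).mp hx)
  | succ n ih =>
    intro x hx
    rw [Function.iterate_succ_apply'] at hx
    rcases pvMem_step.mp hx with hx | ⟨k, hk, hkid⟩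
    · exact ih x hx
    · cases hkv : pvKids g k with
      | none => rw [hkv] at hkid; simp at hkid
      | some v =>
        rw [hkv] at hkid
        exact List.mem_append_right _
          (List.mem_flatMap.mpr ⟨(k, v), pvKids_mem hkv, by simpa using hkid⟩)

theorem pvCl_fix (g : List (String × List String)) (s0 : List String) :
    pvStep g (pvCl g s0) = pvCl g s0 := by
  have hN : pvIterN g s0 = (pvU g s0).length + 1 := by
    simp [pvIterN, pvU, List.length_append]
  have key : ∃ j, j < pvIterN g s0 ∧
      (pvStep g)^[j + 1] (PySem.Set.ofList s0) = (pvStep g)^[j] (PySem.Set.ofList s0) := by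
    by_contra hall
    push_neg at hall
    have grow : ∀ j, j ≤ pvIterN g s0 → j ≤ ((pvStep g)^[j] (PySem.Set.ofList s0)).length := by
      intro j hj
      induction j with
      | zero => exact Nat.zero_le _
      | succ j ihj =>
        have h1 := ihj (Nat.le_of_succ_le hj)
        have hpref : (pvStep g)^[j] (PySem.Set.ofList s0) <+: (pvStep g)^[j+1] (PySem.Set.ofList s0) :=
          pvIter_prefix g _ j (j+1) (Nat.le_succ j)
        have hne := hall j (by omega)
        have hlt : ((pvStep g)^[j] (PySem.Set.ofList s0)).length
            < ((pvStep g)^[j+1] (PySem.Set.ofList s0)).length := by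
          rcases Nat.lt_or_ge ((pvStep g)^[j] (PySem.Set.ofList s0)).length
              ((pvStep g)^[j+1] (PySem.Set.ofList s0)).length with h | h
          · exact h
          · exact absurd ((hpref.eq_of_length (Nat.le_antisymm hpref.length_le h)).symm) hne
        omega
    have hlen := grow _ le_rfl
    have hbound : ((pvStep g)^[pvIterN g s0] (PySem.Set.ofList s0)).length ≤ (pvU g s0).length :=
      ((pvIter_nodup g s0 _).subperm (fun x hx => pvIter_subset_U g s0 _ x hx)).length_le
    omega
  obtain ⟨j, hj, hfix⟩ := key
  have stable : ∀ m, j ≤ m → (pvStep g)^[m] (PySem.Set.ofList s0) = (pvStep g)^[j] (PySem.Set.ofList s0) := by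
    intro m hm
    induction m with
    | zero => obtain rfl := Nat.le_zero.mp hm; rfl
    | succ m ihm =>
      rcases Nat.eq_or_lt_of_le hm with rfl | hlt
      · rfl
      · rw [Function.iterate_succ_apply', ihm (Nat.lt_succ_iff.mp hlt)]
        calc pvStep g ((pvStep g)^[j] (PySem.Set.ofList s0))
            = (pvStep g)^[j + 1] (PySem.Set.ofList s0) := (Function.iterate_succ_apply' _ _ _).symm
          _ = (pvStep g)^[j] (PySem.Set.ofList s0) := hfix
  rw [pvCl, stable _ (Nat.le_of_lt hj)]
  calc pvStep g ((pvStep g)^[j] (PySem.Set.ofList s0))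
      = (pvStep g)^[j + 1] (PySem.Set.ofList s0) := (Function.iterate_succ_apply' _ _ _).symm
    _ = (pvStep g)^[j] (PySem.Set.ofList s0) := hfix

theorem pvCl_subset0 {g : List (String × List String)} {s0 : List String} {s : String}
    (hs : s ∈ s0) : s ∈ pvCl g s0 :=
  (pvIter_prefix g _ 0 (pvIterN g s0) (Nat.zero_le _)).subset ((PySem.Set.mem_ofList s0 s).mpr hs)

theorem pvCl_closed_mem {g : List (String × List String)} {s0 : List String} {k x : String}
    (hk : k ∈ pvCl g s0) (hx : x ∈ (pvKids g k).getD []) : x ∈ pvCl g s0 := by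
  have : x ∈ pvStep g (pvCl g s0) := pvMem_step.mpr (Or.inr ⟨k, hk, hx⟩)
  rwa [pvCl_fix] at this

theorem pvCl_sound {g : List (String × List String)} {s0 : List String} {x : String}
    (h : x ∈ pvCl g s0) : ∃ s ∈ s0, pvReach g s x := by
  have main : ∀ n, ∀ x ∈ (pvStep g)^[n] (PySem.Set.ofList s0), ∃ s ∈ s0, pvReach g s x := by
    intro n
    induction n with
    | zero =>
      intro x hx
      exact ⟨x, (PySem.Set.mem_ofList s0 x).mp hx, pvReach.refl x⟩
    | succ n ih =>
      intro x hx
      rw [Function.iterate_succ_apply'] at hx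
      rcases pvMem_step.mp hx with hx | ⟨k, hk, hkid⟩
      · exact ih x hx
      · obtain ⟨s, hs, hr⟩ := ih k hk
        exact ⟨s, hs, pvReach_snoc hr hkid⟩
  exact main _ x h

theorem pvCl_complete {g : List (String × List String)} {s0 : List String} {s x : String}
    (hs : s ∈ s0) (h : pvReach g s x) : x ∈ pvCl g s0 := by
  have main : ∀ {z x : String}, pvReach g z x → z ∈ pvCl g s0 → x ∈ pvCl g s0 := by
    intro z x h
    induction h with
    | refl => exact id
    | cons he _ ih => exact fun hz => ih (pvCl_closed_mem hz he)
  exact main h (pvCl_subset0 hs)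

-- Pre_, read through pvReach: no reachable class can reach itself through one of its children
theorem pvPre_no_cycle {g : List (String × List String)} {root k c : String}
    (hpre : Pre_get_transitive_childs g root) (hk : pvReach g root k)
    (hc : c ∈ (pvKids g k).getD []) (hck : pvReach g c k) : False := by
  exact hpre k (pvCl_complete (by simp) hk) (pvCl_complete hc hck)

-- ——— A-side: the fuelled recursion is fuel-stable on the acyclic reachable part ———
def pvRK (g : List (String × List String)) (cn : String) : Finset String :=
  (pvKeyset g).filter (fun k => k ∈ pvCl g [cn])

theorem pvRK_ssubset {g : List (String × List String)} {root cn c : String} {v : List String}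
    (hpre : Pre_get_transitive_childs g root) (hroot : pvReach g root cn)
    (hk : pvKids g cn = some v) (hc : c ∈ (pvKids g cn).getD []) :
    pvRK g c ⊂ pvRK g cn := by
  rw [Finset.ssubset_def]
  constructor
  · intro k hkm
    simp only [pvRK, Finset.mem_filter] at hkm ⊢
    refine ⟨hkm.1, ?_⟩
    obtain ⟨s, hs, hr⟩ := pvCl_sound hkm.2
    rw [List.mem_singleton] at hs; subst hs
    exact pvCl_complete (by simp) (pvReach.cons hc hr)
  · intro hsub
    have hcn : cn ∈ pvRK g cn := by
      simp only [pvRK, Finset.mem_filter]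
      exact ⟨List.mem_toFinset.mpr (pvKids_mem_keys hk), pvCl_complete (by simp) (pvReach.refl cn)⟩
    have hmem := hsub hcn
    simp only [pvRK, Finset.mem_filter] at hmem
    obtain ⟨s, hs, hr⟩ := pvCl_sound hmem.2
    rw [List.mem_singleton] at hs; subst hs
    exact pvPre_no_cycle hpre hroot hc hr

theorem pvRK_card_le (g : List (String × List String)) (cn : String) :
    (pvRK g cn).card ≤ g.length := by
  calc (pvRK g cn).card ≤ (pvKeyset g).card := Finset.card_filter_le _ _
    _ ≤ (g.map Prod.fst).length := List.toFinset_card_le _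
    _ = g.length := by simp

theorem pvGoA_stab {g : List (String × List String)} {root : String}
    (hpre : Pre_get_transitive_childs g root) :
    ∀ (f1 : Nat) {cn : String} (f2 : Nat), pvReach g root cn →
      (pvRK g cn).card < f1 → (pvRK g cn).card < f2 →
      pvGoA g f1 cn = pvGoA g f2 cn := by
  intro f1
  induction f1 with
  | zero => intro cn f2 _ h1 _; exact absurd h1 (Nat.not_lt_zero _)
  | succ f1 ih =>
    intro cn f2 hroot h1 h2
    cases f2 with
    | zero => exact absurd h2 (Nat.not_lt_zero _)
    | succ f2 =>
      simp only [pvGoA]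
      cases hk : pvKids g cn with
      | none => rfl
      | some v =>
        apply PySem.List.foldl_congr_mem
        intro acc c hc
        have hcm : c ∈ (pvKids g cn).getD [] := by
          rw [hk]; exact (PySem.List.mem_dedup v c).mp hc
        have hlt := Finset.card_lt_card (pvRK_ssubset hpre hroot hk hcm)
        exact congrArg (PySem.Set.union acc)
          (ih f2 (pvReach_snoc hroot hcm) (by omega) (by omega))

-- A's result, with the recursion unfolded once (all inner calls at canonical fuel)
theorem pvDA_unfold {g : List (String × List String)} {root cn : String}
    (hpre : Pre_get_transitive_childs g root) (hroot : pvReach g root cn) :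
    get_transitive_childs g cn =
      match pvKids g cn with
      | none => []
      | some v =>
        let cs := PySem.List.dedup v
        cs.foldl (fun acc c => PySem.Set.union acc (get_transitive_childs g c)) cs := by
  show pvGoA g (g.length + 1) cn = _
  cases hk : pvKids g cn with
  | none => simp only [pvGoA, hk]
  | some v =>
    simp only [pvGoA, hk]
    apply PySem.List.foldl_congr_mem
    intro acc c hc
    have hcm : c ∈ (pvKids g cn).getD [] := by
      rw [hk]; exact (PySem.List.mem_dedup v c).mp hc
    have hlt := Finset.card_lt_card (pvRK_ssubset hpre hroot hk hcm)
    have hle := pvRK_card_le g cn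
    exact congrArg (PySem.Set.union acc)
      (pvGoA_stab hpre g.length (g.length + 1) (pvReach_snoc hroot hcm) (by omega) (by omega))

theorem pvDA_nodup (g : List (String × List String)) : ∀ (f : Nat) (cn : String), (pvGoA g f cn).Nodup := by
  intro f
  induction f with
  | zero => intro cn; simp [pvGoA]
  | succ f ih =>
    intro cn
    cases hk : pvKids g cn with
    | none => simp [pvGoA, hk]
    | some v =>
      simp only [pvGoA, hk]
      have main : ∀ (l acc : List String), acc.Nodup →
          (l.foldl (fun a c => PySem.Set.union a (pvGoA g f c)) acc).Nodup := by
        intro l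
        induction l with
        | nil => exact fun acc h => h
        | cons x t iht => exact fun acc h => iht _ (PySem.Set.nodup_union _ _ h)
      exact main _ _ (PySem.List.nodup_dedup v)

-- ——— Set algebra ———
theorem pvUnion_add (a b : PySem.Set String) (x : String) :
    PySem.Set.union a (PySem.Set.add b x) = PySem.Set.add (PySem.Set.union a b) x := by
  by_cases hx : x ∈ b
  · rw [PySem.Set.add_of_mem hx, PySem.Set.add_of_mem ((PySem.Set.mem_union a b x).mpr (Or.inr hx))]
  · rw [PySem.Set.add_of_not_mem hx]
    show (b ++ [x]).foldl PySem.Set.add a = PySem.Set.add (b.foldl PySem.Set.add a) x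
    rw [List.foldl_append]
    rfl

theorem pvUnion_assoc (a b : PySem.Set String) (t : List String) :
    PySem.Set.union (PySem.Set.union a b) t = PySem.Set.union a (PySem.Set.union b t) := by
  induction t generalizing b with
  | nil => rfl
  | cons x t ih =>
    have h1 : PySem.Set.union (PySem.Set.union a b) (x :: t)
        = PySem.Set.union (PySem.Set.add (PySem.Set.union a b) x) t := rfl
    have h2 : PySem.Set.union b (x :: t) = PySem.Set.union (PySem.Set.add b x) t := rfl
    rw [h1, h2, ← pvUnion_add, ih]

theorem pvUnion_absorb {a : PySem.Set String} {t : List String}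
    (h : ∀ x ∈ t, x ∈ a) : PySem.Set.union a t = a := by
  induction t generalizing a with
  | nil => rfl
  | cons x t ih =>
    have h1 : PySem.Set.union a (x :: t) = PySem.Set.union (PySem.Set.add a x) t := rfl
    rw [h1, PySem.Set.add_of_mem (h x List.mem_cons_self)]
    exact ih (fun y hy => h y (List.mem_cons_of_mem _ hy))

-- ——— B-side: the worklist loop computes the fold of A's results over the stack ———
def pvFoldD (g : List (String × List String)) (r : PySem.Set String) (st : List String) : List String :=
  st.foldl (fun a s => PySem.Set.union a (get_transitive_childs g s)) r

theorem pvUnion_foldD (g : List (String × List String)) (r init : PySem.Set String) (l : List String) :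
    PySem.Set.union r (l.foldl (fun a c => PySem.Set.union a (get_transitive_childs g c)) init)
      = l.foldl (fun a c => PySem.Set.union a (get_transitive_childs g c)) (PySem.Set.union r init) := by
  induction l generalizing init with
  | nil => rfl
  | cons c l ih =>
    simp only [List.foldl_cons]
    rw [ih, pvUnion_assoc]

-- loop invariant: every done class whose set could still be demanded is already in the
-- accumulated result at the point where it would be demanded
def pvInv (g : List (String × List String)) (done : List String) :
    PySem.Set String → List String → Prop
  | _, [] => True
  | r, t :: rest =>
      (∀ d ∈ done, pvReach g t d → ∀ x ∈ get_transitive_childs g d, x ∈ r)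
      ∧ pvInv g done (PySem.Set.union r (get_transitive_childs g t)) rest

-- the same condition for a single (newly done) class d
def pvAbs (g : List (String × List String)) (d : String) :
    PySem.Set String → List String → Prop
  | _, [] => True
  | r, t :: rest =>
      (pvReach g t d → ∀ x ∈ get_transitive_childs g d, x ∈ r)
      ∧ pvAbs g d (PySem.Set.union r (get_transitive_childs g t)) rest

theorem pvInv_append (g : List (String × List String)) (done : List String)
    (xs ys : List String) : ∀ r, pvInv g done r (xs ++ ys) ↔ pvInv g done r xs ∧ pvInv g done (pvFoldD g r xs) ys := by
  induction xs with
  | nil => intro r; simp [pvInv, pvFoldD]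
  | cons x xs ih =>
    intro r
    simp only [List.cons_append, pvInv, ih, pvFoldD, List.foldl_cons]
    rw [and_assoc]

theorem pvInv_add (g : List (String × List String)) (done : List String) (d : String)
    (st : List String) : ∀ r, pvInv g (PySem.Set.add done d) r st ↔ pvInv g done r st ∧ pvAbs g d r st := by
  induction st with
  | nil => intro r; simp [pvInv, pvAbs]
  | cons t rest ih =>
    intro r
    simp only [pvInv, pvAbs]
    rw [ih]
    constructor
    · rintro ⟨h1, h2, h3⟩
      exact ⟨⟨fun e he => h1 e ((PySem.Set.mem_add done d e).mpr (Or.inl he)), h2⟩,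
        h1 d ((PySem.Set.mem_add done d d).mpr (Or.inr rfl)), h3⟩
    · rintro ⟨⟨h1, h2⟩, h3, h4⟩
      refine ⟨fun e he => ?_, h2, h4⟩
      rcases (PySem.Set.mem_add done d e).mp he with he | rfl
      · exact h1 e he
      · exact h3

theorem pvAbs_append (g : List (String × List String)) (d : String)
    (xs ys : List String) : ∀ r, pvAbs g d r (xs ++ ys) ↔ pvAbs g d r xs ∧ pvAbs g d (pvFoldD g r xs) ys := by
  induction xs with
  | nil => intro r; simp [pvAbs, pvFoldD]
  | cons x xs ih =>
    intro r
    simp only [List.cons_append, pvAbs, ih, pvFoldD, List.foldl_cons]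
    rw [and_assoc]

theorem pvAbs_of_not (g : List (String × List String)) {d : String} (st : List String)
    (h : ∀ t ∈ st, ¬ pvReach g t d) : ∀ r, pvAbs g d r st := by
  induction st with
  | nil => intro r; trivial
  | cons t rest ih =>
    intro r
    exact ⟨fun hr => absurd hr (h t List.mem_cons_self),
      ih (fun u hu => h u (List.mem_cons_of_mem _ hu)) _⟩

theorem pvAbs_of_all (g : List (String × List String)) {d : String} (st : List String) :
    ∀ r, (∀ x ∈ get_transitive_childs g d, x ∈ r) → pvAbs g d r st := by
  induction st with
  | nil => intro r _; trivial
  | cons t rest ih =>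
    intro r h
    exact ⟨fun _ => h,
      ih _ (fun x hx => (PySem.Set.mem_union r _ x).mpr (Or.inl (h x hx)))⟩

theorem pvInv_of_all (g : List (String × List String)) (done : List String) (st : List String) :
    ∀ r, (∀ t ∈ st, ∀ d ∈ done, pvReach g t d → ∀ x ∈ get_transitive_childs g d, x ∈ r) →
      pvInv g done r st := by
  induction st with
  | nil => intro r _; trivial
  | cons t rest ih =>
    intro r h
    refine ⟨h t List.mem_cons_self, ih _ ?_⟩
    intro u hu d hd hr x hx
    exact (PySem.Set.mem_union r _ x).mpr
      (Or.inl (h u (List.mem_cons_of_mem _ hu) d hd hr x hx))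

theorem pvGoB_main {g : List (String × List String)} {root : String}
    (hpre : Pre_get_transitive_childs g root) :
    ∀ (stack : List String) (res done : PySem.Set String),
      (∀ s ∈ stack, pvReach g root s) → pvInv g done res stack →
      pvGoB g stack res done = pvFoldD g res stack := by
  intro stack res done
  induction stack, res, done using pvGoB.induct (g := g) with
  | case1 res done => intro _ _; rw [pvGoB_nil]; rfl
  | case2 res done cn rest h ih =>
    intro hst hinv
    obtain ⟨H0, Hrest⟩ := hinv
    have habs := H0 cn h (pvReach.refl cn)
    have hre : PySem.Set.union res (get_transitive_childs g cn) = res := pvUnion_absorb habs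
    rw [pvGoB_skip h, ih (fun s hs => hst s (List.mem_cons_of_mem _ hs)) (hre ▸ Hrest)]
    show pvFoldD g res rest = pvFoldD g res (cn :: rest)
    unfold pvFoldD
    rw [List.foldl_cons, hre]
  | case3 res done cn rest h h2 ih =>
    intro hst hinv
    obtain ⟨H0, Hrest⟩ := hinv
    have hda : get_transitive_childs g cn = [] := by
      simp [get_transitive_childs, pvGoA, h2]
    have hre : PySem.Set.union res (get_transitive_childs g cn) = res := by rw [hda]; rfl
    rw [pvGoB_none h h2]
    rw [ih (fun s hs => hst s (List.mem_cons_of_mem _ hs))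
      ((pvInv_add g done cn rest res).mpr ⟨hre ▸ Hrest, pvAbs_of_all g rest res (by simp [hda])⟩)]
    show pvFoldD g res rest = pvFoldD g res (cn :: rest)
    unfold pvFoldD
    rw [List.foldl_cons, hre]
  | case4 res done cn rest h v h2 cs ih =>
    intro hst hinv
    obtain ⟨H0, Hrest⟩ := hinv
    have hrootcn := hst cn List.mem_cons_self
    have hkid : ∀ c ∈ PySem.List.dedup v, c ∈ (pvKids g cn).getD [] := by
      intro c hc; rw [h2]; simpa using (PySem.List.mem_dedup v c).mp hc
    have hda : get_transitive_childs g cn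
        = (PySem.List.dedup v).foldl
            (fun a c => PySem.Set.union a (get_transitive_childs g c)) (PySem.List.dedup v) := by
      have hu := pvDA_unfold hpre hrootcn
      rw [h2] at hu
      exact hu
    have E : PySem.Set.union res (get_transitive_childs g cn)
        = pvFoldD g (PySem.Set.union res (PySem.List.dedup v)) (PySem.List.dedup v) := by
      rw [hda]
      exact pvUnion_foldD g res (PySem.List.dedup v) (PySem.List.dedup v)
    have hst' : ∀ s ∈ PySem.List.dedup v ++ rest, pvReach g root s := by
      intro s hs
      rcases List.mem_append.mp hs with hs | hs
      · exact pvReach_snoc hrootcn (hkid s hs)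
      · exact hst s (List.mem_cons_of_mem _ hs)
    have hinv' : pvInv g (PySem.Set.add done cn)
        (PySem.Set.union res (PySem.List.dedup v)) (PySem.List.dedup v ++ rest) := by
      apply (pvInv_add g done cn _ _).mpr
      constructor
      · apply (pvInv_append g done _ rest _).mpr
        constructor
        · apply pvInv_of_all
          intro t ht d hd hr x hx
          exact (PySem.Set.mem_union res _ x).mpr
            (Or.inl (H0 d hd (pvReach.cons (hkid t ht) hr) x hx))
        · rw [← E]; exact Hrest
      · apply (pvAbs_append g cn _ rest _).mpr
        constructor
        · apply pvAbs_of_not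
          intro t ht hrch
          exact pvPre_no_cycle hpre hrootcn (hkid t ht) hrch
        · rw [← E]
          apply pvAbs_of_all
          intro x hx
          exact (PySem.Set.mem_union res _ x).mpr (Or.inr hx)
    rw [pvGoB_some h h2, ih hst' hinv']
    show pvFoldD g (PySem.Set.union res (PySem.List.dedup v)) (PySem.List.dedup v ++ rest)
      = pvFoldD g res (cn :: rest)
    unfold pvFoldD
    rw [List.foldl_append, List.foldl_cons]
    congr 1
    exact E.symm

-- ===== VERDICT (by name: the statement is the Claim_ definition above) =====
theorem get_transitive_childs_spec : Claim_equal_get_transitive_childs := by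
  intro g root _ hpre
  unfold Spec_get_transitive_childs
  have h1 : pvGoB g [root] PySem.Set.empty PySem.Set.empty = pvFoldD g PySem.Set.empty [root] := by
    apply pvGoB_main hpre
    · intro s hs
      rw [List.mem_singleton] at hs
      simpa [hs] using pvReach.refl root
    · exact ⟨fun d hd => absurd hd (List.not_mem_nil), trivial⟩
  have h2 : pvFoldD g PySem.Set.empty [root] = get_transitive_childs g root := by
    show PySem.Set.union PySem.Set.empty (get_transitive_childs g root) = _
    rw [show PySem.Set.union PySem.Set.empty (get_transitive_childs g root)
      = PySem.Set.ofList (get_transitive_childs g root) from rfl]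
    exact PySem.Set.ofList_eq_self_of_nodup _ (pvDA_nodup g _ root)
  show get_transitive_childs g root
    = PySem.Set.ofList (pvGoB g [root] PySem.Set.empty PySem.Set.empty)
  have h3 := PySem.Set.ofList_eq_self_of_nodup (get_transitive_childs g root)
    (pvDA_nodup g (g.length + 1) root)
  rw [h1, h2, h3]
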